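-- pv_equiv track=rewrite | github.com/BrianMuigai/betbot | prep_training_data.py | get_team_loosing_streak
-- ===== SOURCE A (Python) =====
-- def get_team_loosing_streak(team_prog):
-- 	team_loosing_streak = 0
-- 	tmp = 0
--
-- 	for i in team_prog:
-- 		if i == "L":
-- 			tmp += 1
-- 		elif tmp > team_loosing_streak:
-- 			team_loosing_streak = tmp
-- 			tmp = 0
-- 		else:
-- 			tmp = 0
--
-- 	return team_loosing_streak
-- ===== SOURCE B (Python) =====
-- def get_team_loosing_streak(team_prog):
--     # run-length scan: jump over each run with a second pointer, keep the
--     # longest "L" run seen (including a trailing one, which the original drops)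
--     xs = list(team_prog)
--     best = 0
--     n = len(xs)
--     i = 0
--     while i < n:
--         j = i + 1
--         while j < n and xs[j] == xs[i]:
--             j += 1
--         if xs[i] == "L":
--             run = j - i
--             if run > best:
--                 best = run
--         i = j
--     return best
-- ===== Notes on version B (the rewrite author's own statement) =====
-- stated objective: alternative
-- what changed: Replaces the per-element counter/elif state machine with a two-pointer run-length scan that jumps over whole runs and maximises over the 'L' run lengths, counting the trailing run which A's elif never flushes.
-- intended difference: On inputs ending in a run of "L" strictly longer than every earlier "L" run, A returns the longest earlier streak (e.g. 0 on ["L"]) because its elif only records a streak when a non-"L" element follows it, while B returns the trailing run's length, the intended longest losing streak. — e.g. on get_team_loosing_streak(["L"]): A returns 0, B returns 1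
import Mathlib
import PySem

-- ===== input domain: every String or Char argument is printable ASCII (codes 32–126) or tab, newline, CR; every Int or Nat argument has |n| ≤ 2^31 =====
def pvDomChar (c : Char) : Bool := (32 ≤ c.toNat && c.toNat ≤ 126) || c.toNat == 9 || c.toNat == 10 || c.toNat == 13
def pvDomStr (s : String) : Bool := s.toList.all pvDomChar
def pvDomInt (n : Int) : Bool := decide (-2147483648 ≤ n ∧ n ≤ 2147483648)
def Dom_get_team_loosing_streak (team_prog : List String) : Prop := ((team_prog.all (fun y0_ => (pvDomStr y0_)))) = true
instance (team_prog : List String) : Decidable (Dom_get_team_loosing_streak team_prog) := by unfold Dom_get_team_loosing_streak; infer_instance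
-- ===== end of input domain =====

-- B replaces A's per-element counter/elif state machine by a two-pointer run-length scan
-- (alternative decomposition, same cost); B also counts a trailing "L" run, which A drops (see D_).


-- ===== PORT A =====
-- A's loop body: if i == "L": tmp += 1  elif tmp > best: best, tmp = tmp, 0  else: tmp = 0
def pvStepA (s : Int × Int) (i : String) : Int × Int :=
  if i = "L" then (s.1, s.2 + 1)
  else if s.2 > s.1 then (s.2, 0)
  else (s.1, 0)

def get_team_loosing_streak (team_prog : List String) : Int :=
  (team_prog.foldl pvStepA (0, 0)).1

-- ===== PORT B =====
-- B's outer while loop: each iteration consumes one whole run (inner j-pointer =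
-- takeWhile/dropWhile of elements equal to the run's head) and updates best.
def pvScanB : List String → Int → Int
  | [], best => best
  | x :: l, best =>
      let run : Int := 1 + (l.takeWhile (· == x)).length
      pvScanB (l.dropWhile (· == x)) (if x = "L" ∧ run > best then run else best)
termination_by l _ => l.length
decreasing_by simpa using Nat.lt_succ_of_le (List.length_dropWhile_le _ _)

def get_team_loosing_streak_alt (team_prog : List String) : Int :=
  pvScanB team_prog 0

-- ===== PRECONDITION & SPEC =====
-- On inputs ending in a run of "L" strictly longer than every earlier "L" run, A returns the
-- longest earlier streak (e.g. 0 on ["L"]) because its elif only records a streak once a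
-- non-"L" element follows it, while B returns the trailing run's length, the intended answer.
-- (Shape of that input set: for some t ≥ 1 the last t elements are "L", the element before
-- them — if any — is not "L", and no t consecutive "L"s occur before them.)
def D_get_team_loosing_streak (team_prog : List String) : Prop :=
  ∃ t ∈ Finset.Icc 1 team_prog.length,
    team_prog.drop (team_prog.length - t) = List.replicate t "L" ∧
    (team_prog.take (team_prog.length - t)).getLast? ≠ some "L" ∧
    ¬ (List.replicate t "L" <:+: team_prog.take (team_prog.length - t))
instance (team_prog : List String) : Decidable (D_get_team_loosing_streak team_prog) := by
  unfold D_get_team_loosing_streak; infer_instance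

def Spec_get_team_loosing_streak (team_prog : List String) (out : Int) : Prop :=
  ¬ D_get_team_loosing_streak team_prog → out = get_team_loosing_streak_alt team_prog
instance (team_prog : List String) (out : Int) : Decidable (Spec_get_team_loosing_streak team_prog out) := by
  unfold Spec_get_team_loosing_streak; infer_instance

def pvDiffWitness_get_team_loosing_streak : List String := ["L"]
def pvDiffWitnessOut_get_team_loosing_streak : Int × Int := (0, 1)

-- ===== CLAIM (what is proved, stated in full; the proofs are below) =====
def Claim_unchanged_get_team_loosing_streak : Prop := ∀ (team_prog : List String), Dom_get_team_loosing_streak team_prog → Spec_get_team_loosing_streak team_prog (get_team_loosing_streak team_prog)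
def Claim_changed_get_team_loosing_streak : Prop := Dom_get_team_loosing_streak (pvDiffWitness_get_team_loosing_streak) ∧ D_get_team_loosing_streak (pvDiffWitness_get_team_loosing_streak) ∧ get_team_loosing_streak (pvDiffWitness_get_team_loosing_streak) = pvDiffWitnessOut_get_team_loosing_streak.1 ∧ get_team_loosing_streak_alt (pvDiffWitness_get_team_loosing_streak) = pvDiffWitnessOut_get_team_loosing_streak.2 ∧ pvDiffWitnessOut_get_team_loosing_streak.1 ≠ pvDiffWitnessOut_get_team_loosing_streak.2
def Claim_exact_get_team_loosing_streak : Prop := ∀ (team_prog : List String), Dom_get_team_loosing_streak team_prog → D_get_team_loosing_streak team_prog → get_team_loosing_streak team_prog ≠ get_team_loosing_streak_alt team_prog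

-- ===== LEMMAS AND PROOFS =====

-- proof-side views: length of the trailing run of "L" and the part of the list before it
def pvTail (l : List String) : Nat := (l.reverse.takeWhile (· == "L")).length
def pvPrefix (l : List String) : List String := (l.reverse.dropWhile (· == "L")).reverse

theorem pvStepA_eq (s : Int × Int) (i : String) :
    pvStepA s i = if i = "L" then (s.1, s.2 + 1) else (max s.1 s.2, 0) := by
  unfold pvStepA
  split_ifs <;> simp_all <;> omega

-- folding A's step over an all-"L" list only bumps the counter
theorem pvFoldA_allL (q : List String) (h : ∀ y ∈ q, y = "L") (s : Int × Int) :
    q.foldl pvStepA s = (s.1, s.2 + q.length) := by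
  induction q generalizing s with
  | nil => simp
  | cons x l ih =>
      have hx : x = "L" := h x (by simp)
      rw [List.foldl_cons, pvStepA_eq, if_pos hx, ih (fun y hy => h y (by simp [hy]))]
      simp; push_cast; ring

-- folding A's step over an all-non-"L" list from (0,0) stays at (0,0)
theorem pvFoldA_noL (q : List String) (h : ∀ y ∈ q, y ≠ "L") :
    q.foldl pvStepA (0, 0) = (0, 0) := by
  induction q with
  | nil => simp
  | cons x l ih =>
      have hx : x ≠ "L" := h x (by simp)
      rw [List.foldl_cons, pvStepA_eq, if_neg hx]
      simpa using ih (fun y hy => h y (by simp [hy]))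

-- the best-so-far accumulator distributes over max
theorem pvFoldA_max (q : List String) (a b t : Int) :
    (q.foldl pvStepA (max a b, t)).1 = max a (q.foldl pvStepA (b, t)).1 := by
  induction q generalizing b t with
  | nil => simp
  | cons x l ih =>
      simp only [List.foldl_cons, pvStepA_eq]
      by_cases hx : x = "L"
      · simpa [hx] using ih b (t + 1)
      · simp only [if_neg hx]
        rw [show max (max a b) t = max a (max b t) by omega, ih (max b t) 0]

theorem pvFoldA_nonneg (q : List String) (b t : Int) (hb : 0 ≤ b) (ht : 0 ≤ t) :
    0 ≤ (q.foldl pvStepA (b, t)).1 ∧ 0 ≤ (q.foldl pvStepA (b, t)).2 := by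
  induction q generalizing b t with
  | nil => simpa using ⟨hb, ht⟩
  | cons x l ih =>
      simp only [List.foldl_cons, pvStepA_eq]
      by_cases hx : x = "L"
      · simpa [hx] using ih b (t + 1) hb (by omega)
      · simp only [if_neg hx]
        exact ih _ _ (by omega) le_rfl

-- trailing-run facts
theorem pvTail_allL (u : List String) (h : ∀ y ∈ u, y = "L") : pvTail u = u.length := by
  unfold pvTail
  rw [List.takeWhile_eq_self_iff.mpr (by intro y hy; simp [h y (List.mem_reverse.mp hy)])]
  simp

theorem pvTakeWhile_nil_of_noL (u : List String) (hu : ∀ y ∈ u, y ≠ "L") :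
    u.reverse.takeWhile (· == "L") = [] := by
  cases hu' : u.reverse with
  | nil => simp
  | cons x w =>
      have hx : x ∈ u := by rw [← List.mem_reverse, hu']; simp
      simp [List.takeWhile_cons, show (x == "L") = false by simpa using hu x hx]

theorem pvTail_append_of_exists (u d : List String) (h : ∃ y ∈ d, y ≠ "L") :
    pvTail (u ++ d) = pvTail d := by
  unfold pvTail
  rw [List.reverse_append, List.takeWhile_append, if_neg]
  intro hlen
  have heq : d.reverse.takeWhile (· == "L") = d.reverse :=
    (List.takeWhile_prefix _).eq_of_length hlen
  obtain ⟨y, hy, hne⟩ := h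
  have := List.takeWhile_eq_self_iff.mp heq y (List.mem_reverse.mpr hy)
  exact hne (by simpa using this)

theorem pvTail_append_allL (u d : List String) (hu : ∀ y ∈ u, y ≠ "L") (hd : ∀ y ∈ d, y = "L") :
    pvTail (u ++ d) = d.length := by
  unfold pvTail
  rw [List.reverse_append, List.takeWhile_append, if_pos]
  · rw [pvTakeWhile_nil_of_noL u hu]; simp
  · rw [List.takeWhile_eq_self_iff.mpr (by intro y hy; simp [hd y (List.mem_reverse.mp hy)])]

-- decomposition l = pvPrefix l ++ L^(pvTail l), and pvPrefix never ends in "L"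
theorem pvDecomp (l : List String) :
    l = pvPrefix l ++ List.replicate (pvTail l) "L" := by
  unfold pvPrefix pvTail
  have h1 : l.reverse.takeWhile (· == "L")
      = List.replicate (l.reverse.takeWhile (· == "L")).length "L" := by
    apply List.eq_replicate_of_mem
    intro y hy
    simpa using List.mem_takeWhile_imp hy
  conv_lhs => rw [← l.reverse_reverse,
    ← List.takeWhile_append_dropWhile (p := (· == "L")) (l := l.reverse)]
  rw [List.reverse_append]
  congr 1
  rw [h1]; simp

theorem pvPrefix_getLast (l : List String) (z : String) (hz : (pvPrefix l).getLast? = some z) :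
    z ≠ "L" := by
  unfold pvPrefix at hz
  rw [List.getLast?_reverse] at hz
  intro h; subst h
  have := List.head?_dropWhile_not (p := (· == "L")) (l := l.reverse)
  rw [hz] at this
  simp at this

theorem pvTail_concat (u : List String) (t : Nat)
    (hu : ∀ z, u.getLast? = some z → z ≠ "L") :
    pvTail (u ++ List.replicate t "L") = t := by
  unfold pvTail
  rw [List.reverse_append, List.reverse_replicate, List.takeWhile_append,
    if_pos (by rw [List.takeWhile_eq_self_iff.mpr
      (fun x hx => by simp [List.eq_of_mem_replicate hx])])]
  have h0 : u.reverse.takeWhile (· == "L") = [] := by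
    cases hr : u.reverse with
    | nil => simp
    | cons z w =>
        have hz : u.getLast? = some z := by rw [← List.head?_reverse, hr]; rfl
        simp [show (z == "L") = false by simpa using hu z hz]
  rw [h0]; simp

theorem pvTail_le_length (l : List String) : pvTail l ≤ l.length := by
  unfold pvTail
  calc (l.reverse.takeWhile (· == "L")).length
      ≤ l.reverse.length := (List.takeWhile_sublist _).length_le
    _ = l.length := by simp

theorem pvD_iff (l : List String) :
    D_get_team_loosing_streak l ↔
      (0 < pvTail l ∧ ¬ (List.replicate (pvTail l) "L" <:+: pvPrefix l)) := by
  unfold D_get_team_loosing_streak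
  constructor
  · rintro ⟨t, hmem, hdrop, hlast, hninf⟩
    obtain ⟨ht1, ht2⟩ := Finset.mem_Icc.mp hmem
    have hl : l = l.take (l.length - t) ++ List.replicate t "L" := by
      conv_lhs => rw [← List.take_append_drop (l.length - t) l]
      rw [hdrop]
    have htail : pvTail l = t := by
      conv_lhs => rw [hl]
      exact pvTail_concat _ _ (fun z hz he => hlast (he ▸ hz))
    have hpre : pvPrefix l = l.take (l.length - t) := by
      have h2 := (pvDecomp l).symm
      rw [htail] at h2
      exact List.append_cancel_right (h2.trans hl)
    rw [htail, hpre]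
    exact ⟨by omega, hninf⟩
  · rintro ⟨hpos, hninf⟩
    have hlen : (pvPrefix l).length = l.length - pvTail l := by
      have := congrArg List.length (pvDecomp l)
      simp at this
      omega
    have htk : l.take (l.length - pvTail l) = pvPrefix l := by
      rw [← hlen]
      nth_rewrite 2 [pvDecomp l]
      exact List.take_left
    have hdp : l.drop (l.length - pvTail l) = List.replicate (pvTail l) "L" := by
      rw [← hlen]
      nth_rewrite 2 [pvDecomp l]
      exact List.drop_left
    refine ⟨pvTail l, Finset.mem_Icc.mpr ⟨hpos, pvTail_le_length l⟩, hdp, ?_, ?_⟩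
    · rw [htk]
      intro h
      exact pvPrefix_getLast l _ h rfl
    · rw [htk]
      exact hninf

-- ===== characterisation of A =====

-- an "L" run followed by a non-"L" element: A records max(run, rest)
theorem pvA_L_run (a : List String) (ha : ∀ y ∈ a, y = "L") (y : String) (hy : y ≠ "L")
    (d : List String) :
    get_team_loosing_streak (a ++ y :: d)
      = max (a.length : Int) (get_team_loosing_streak (y :: d)) := by
  unfold get_team_loosing_streak
  rw [List.foldl_append, pvFoldA_allL a ha (0, 0)]
  simp only [List.foldl_cons, pvStepA_eq, if_neg hy]
  rw [show max (0 : Int) (0 + (a.length : Int)) = max ((a.length : Int)) (max 0 0) by simp]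
  rw [pvFoldA_max d (a.length : Int) (max 0 0) 0]

-- a run of non-"L" elements contributes nothing
theorem pvA_N_run (a : List String) (ha : ∀ y ∈ a, y ≠ "L") (d : List String) :
    get_team_loosing_streak (a ++ d) = get_team_loosing_streak d := by
  unfold get_team_loosing_streak
  rw [List.foldl_append, pvFoldA_noL a ha]

-- A ignores an all-"L" suffix
theorem pvA_drop_tail (p : List String) (k : Nat) :
    get_team_loosing_streak (p ++ List.replicate k "L") = get_team_loosing_streak p := by
  unfold get_team_loosing_streak
  rw [List.foldl_append,
    pvFoldA_allL _ (by intro y hy; exact List.eq_of_mem_replicate hy)]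

theorem pvA_nonneg (l : List String) : 0 ≤ get_team_loosing_streak l :=
  (pvFoldA_nonneg l 0 0 le_rfl le_rfl).1

-- A run of "L"s followed by something containing a non-"L" yields a streak ≥ the pending count
theorem pvFoldA_reach (v : List String) (hv : ∃ y ∈ v, y ≠ "L") (b t : Int)
    (hb : 0 ≤ b) (ht : 0 ≤ t) : t ≤ (v.foldl pvStepA (b, t)).1 := by
  induction v generalizing b t with
  | nil => simp at hv
  | cons y v' ih =>
      simp only [List.foldl_cons, pvStepA_eq]
      by_cases hy : y = "L"
      · have hv' : ∃ y ∈ v', y ≠ "L" := by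
          obtain ⟨w, hw, hne⟩ := hv
          rcases (by simpa using hw : w = y ∨ w ∈ v') with rfl | h
          · exact absurd hy hne
          · exact ⟨w, h, hne⟩
        have := ih hv' b (t + 1) hb (by omega)
        simp only [if_pos hy]; omega
      · simp only [if_neg hy]
        rw [max_comm b t, pvFoldA_max v' t b 0]
        omega

-- if L^t is an infix of p and p does not end in "L", then A p ≥ t
theorem pvInfix_le_A (t : Nat) (ht : 0 < t) (p : List String)
    (hlast : ∀ z, p.getLast? = some z → z ≠ "L")
    (h : List.replicate t "L" <:+: p) : (t : Int) ≤ get_team_loosing_streak p := by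
  obtain ⟨u, v, rfl⟩ := h
  have hv : ∃ y ∈ v, y ≠ "L" := by
    by_contra hco
    push_neg at hco
    have hq : ∀ y ∈ List.replicate t "L" ++ v, y = "L" := by
      intro y hy
      rcases List.mem_append.mp hy with h1 | h2
      · exact List.eq_of_mem_replicate h1
      · exact hco y h2
    have hne : (List.replicate t "L" ++ v) ≠ [] := by
      intro hn
      have := congrArg List.length hn
      simp at this; omega
    have hz := List.getLast?_eq_some_getLast hne
    have hmem := List.getLast_mem hne
    have : (u ++ List.replicate t "L" ++ v).getLast? = some ((List.replicate t "L" ++ v).getLast hne) := by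
      rw [List.append_assoc, List.getLast?_append_of_ne_nil u hne]
      exact hz
    exact hlast _ this (hq _ hmem)
  unfold get_team_loosing_streak
  rw [List.append_assoc, List.foldl_append, List.foldl_append,
    pvFoldA_allL (List.replicate t "L") (fun y hy => List.eq_of_mem_replicate hy)]
  obtain ⟨s1, s2⟩ := pvFoldA_nonneg u 0 0 le_rfl le_rfl
  have := pvFoldA_reach v hv (u.foldl pvStepA (0, 0)).1
      ((u.foldl pvStepA (0, 0)).2 + (List.replicate t "L").length) s1 (by simp; omega)
  simp only [List.length_replicate] at this ⊢
  omega

-- if A's fold (with c pending "L"s) reaches ≥ t while best < t, then L^t occurs in L^c ++ p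
theorem pvFoldA_infix (t : Nat) (p : List String) (c : Nat) (b : Int) (hb : b < (t : Int))
    (h : (t : Int) ≤ (p.foldl pvStepA (b, (c : Int))).1) :
    List.replicate t "L" <:+: List.replicate c "L" ++ p := by
  induction p generalizing c b with
  | nil => simp at h; omega
  | cons y p' ih =>
      simp only [List.foldl_cons, pvStepA_eq] at h
      by_cases hy : y = "L"
      · rw [if_pos hy] at h
        rw [show ((c : Int) + 1) = ((c + 1 : Nat) : Int) by push_cast; ring] at h
        have := ih (c + 1) b hb h
        subst hy
        rw [List.replicate_succ' (n := c)] at this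
        simpa [List.append_assoc] using this
      · rw [if_neg hy] at h
        by_cases hm : max b (c : Int) < (t : Int)
        · have := ih 0 (max b (c : Int)) hm (by simpa using h)
          simp only [List.replicate_zero, List.nil_append] at this
          exact this.trans ((List.suffix_cons y p').trans (List.suffix_append _ _)).isInfix
        · have hc : t ≤ c := by omega
          have h1 : List.replicate t "L" <+: List.replicate c "L" :=
            ⟨List.replicate (c - t) "L", by rw [List.replicate_append_replicate]; congr 1; omega⟩
          exact h1.isInfix.trans (List.prefix_append _ _).isInfix

-- ===== characterisation of B =====

theorem pvScanB_eq_aux (n : Nat) : ∀ l : List String, l.length ≤ n → ∀ b : Int, 0 ≤ b →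
    pvScanB l b = max b (max (get_team_loosing_streak l) ((pvTail l : Nat) : Int)) := by
  induction n with
  | zero =>
      intro l hl b hb
      have hnil : l = [] := List.eq_nil_of_length_eq_zero (Nat.le_zero.mp hl)
      subst hnil
      rw [pvScanB]
      unfold get_team_loosing_streak pvTail
      simp; omega
  | succ n ihn =>
      intro l hl b hb
      cases l with
      | nil =>
          rw [pvScanB]
          unfold get_team_loosing_streak pvTail
          simp; omega
      | cons x l' =>
          rw [pvScanB]
          set a := l'.takeWhile (· == x) with ha
          set d := l'.dropWhile (· == x) with hd
          set run : Int := 1 + (a.length : Int) with hrun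
          have hmem_a : ∀ y ∈ a, y = x := by
            intro y hy
            have h1 := List.mem_takeWhile_imp (p := (· == x)) (l := l')
              (show y ∈ l'.takeWhile (· == x) from hy)
            exact eq_of_beq (by simpa using h1)
          have hsplit : x :: l' = (x :: a) ++ d := by
            simp [ha, hd, List.takeWhile_append_dropWhile]
          have hb' : 0 ≤ if x = "L" ∧ run > b then run else b := by
            split_ifs <;> omega
          have hdlen : d.length ≤ n := by
            have h1 : d.length ≤ l'.length := by
              rw [hd]; exact List.length_dropWhile_le _ _
            have h2 : l'.length + 1 ≤ n + 1 := by simpa using hl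
            omega
          rw [ihn d hdlen _ hb']
          by_cases hx : x = "L"
          · have hallL : ∀ y ∈ x :: a, y = "L" := by
              intro y hy
              rcases (by simpa using hy : y = x ∨ y ∈ a) with rfl | h
              · exact hx
              · rw [hmem_a y h, hx]
            cases hdc : d with
            | nil =>
                have hl2 : x :: l' = x :: a := by rw [hsplit, hdc, List.append_nil]
                rw [hl2]
                unfold get_team_loosing_streak
                rw [pvFoldA_allL _ hallL, pvTail_allL _ hallL]
                have hT0 : pvTail ([] : List String) = 0 := by unfold pvTail; simp
                have hlen : (((x :: a).length : Nat) : Int) = 1 + (a.length : Int) := by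
                  push_cast [List.length_cons]; ring
                simp only [hT0, List.foldl_nil, hlen]
                split_ifs with hcond
                · simp only [hx, true_and] at hcond
                  simp; omega
                · simp only [hx, true_and, not_lt] at hcond
                  simp; omega
            | cons y d' =>
                have hy : y ≠ "L" := by
                  have := List.head?_dropWhile_not (p := (· == x)) (l := l')
                  rw [← hd, hdc] at this
                  simp only [List.head?_cons] at this
                  intro hcontr; rw [hcontr, ← hx] at this; simp at this
                have hA : get_team_loosing_streak (x :: l')
                    = max run (get_team_loosing_streak d) := by
                  rw [hsplit, hdc, pvA_L_run (x :: a) hallL y hy d']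
                  rw [hrun]
                  congr 1
                  simp; push_cast; ring
                have hT : pvTail (x :: l') = pvTail d := by
                  rw [hsplit]
                  exact pvTail_append_of_exists _ _ ⟨y, by rw [hdc]; simp, hy⟩
                rw [hA, hT, ← hdc]
                have hApos := pvA_nonneg d
                split_ifs with hcond
                · omega
                · simp only [hx, true_and, not_lt] at hcond
                  omega
          · have hallN : ∀ y ∈ x :: a, y ≠ "L" := by
              intro y hy
              rcases (by simpa using hy : y = x ∨ y ∈ a) with rfl | h
              · exact hx
              · rw [hmem_a y h]; exact hx
            have hA : get_team_loosing_streak (x :: l') = get_team_loosing_streak d := by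
              rw [hsplit]; exact pvA_N_run _ hallN d
            have hT : pvTail (x :: l') = pvTail d := by
              rw [hsplit]
              by_cases hex : ∃ y ∈ d, y ≠ "L"
              · exact pvTail_append_of_exists _ _ hex
              · push_neg at hex
                rw [pvTail_append_allL _ _ hallN hex, pvTail_allL _ hex]
            rw [hA, hT]
            split_ifs with hcond
            · exact absurd hcond.1 hx
            · rfl

theorem pvB_eq (l : List String) :
    get_team_loosing_streak_alt l
      = max (get_team_loosing_streak l) ((pvTail l : Nat) : Int) := by
  have hApos := pvA_nonneg l
  unfold get_team_loosing_streak_alt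
  rw [pvScanB_eq_aux l.length l le_rfl 0 le_rfl]
  omega

theorem pvA_eq_prefix (l : List String) :
    get_team_loosing_streak l = get_team_loosing_streak (pvPrefix l) := by
  conv_lhs => rw [pvDecomp l]
  exact pvA_drop_tail _ _

-- ===== VERDICT (by name: the statement is the Claim_ definition above) =====
theorem get_team_loosing_streak_spec : Claim_unchanged_get_team_loosing_streak := by
  unfold Claim_unchanged_get_team_loosing_streak
  intro l _
  unfold Spec_get_team_loosing_streak
  intro hnd
  rw [pvB_eq]
  have hApos := pvA_nonneg l
  by_cases h0 : pvTail l = 0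
  · rw [h0]; simp; omega
  · have hinf : List.replicate (pvTail l) "L" <:+: pvPrefix l := by
      by_contra hni
      exact hnd ((pvD_iff l).mpr ⟨Nat.pos_of_ne_zero h0, hni⟩)
    have := pvInfix_le_A (pvTail l) (Nat.pos_of_ne_zero h0) (pvPrefix l)
      (pvPrefix_getLast l) hinf
    rw [← pvA_eq_prefix l] at this
    omega

theorem get_team_loosing_streak_changed : Claim_changed_get_team_loosing_streak := by
  unfold Claim_changed_get_team_loosing_streak
  refine ⟨by decide, by decide, by decide, ?_, by decide⟩
  show get_team_loosing_streak_alt ["L"] = 1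
  rw [pvB_eq]
  decide

theorem get_team_loosing_streak_tight : Claim_exact_get_team_loosing_streak := by
  unfold Claim_exact_get_team_loosing_streak
  intro l _ hd heq
  obtain ⟨hpos, hninf⟩ := (pvD_iff l).mp hd
  rw [pvB_eq] at heq
  have hApos := pvA_nonneg l
  have hlt : get_team_loosing_streak l < ((pvTail l : Nat) : Int) := by
    by_contra hge
    push_neg at hge
    have hge' : ((pvTail l : Nat) : Int) ≤ get_team_loosing_streak (pvPrefix l) := by
      rw [← pvA_eq_prefix l]; exact hge
    have := pvFoldA_infix (pvTail l) (pvPrefix l) 0 0 (by exact_mod_cast hpos)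
      (by simpa [get_team_loosing_streak] using hge')
    simp only [List.replicate_zero, List.nil_append] at this
    exact hninf this
  omega
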